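-- pv_equiv track=rewrite | github.com/thitcc/PAA | Huxley/2180.py | monkey
-- ===== SOURCE A (Python) =====
-- def test(ladder, k):
--     current = 0
--
--     for step in ladder:
--         jump = step - current
--         current = step
--         if jump > k:
--             return False
--         elif jump == k:
--             k -= 1
--
--     return True
--
-- def monkey(ladder, begin, end):
--     if begin > end:
--         return begin
--
--     k = (begin + end) // 2
--
--     if test(ladder, k):
--         return monkey(ladder, begin, k-1)
--     else:
--         return monkey(ladder, k+1, end)
-- ===== SOURCE B (Python) =====
-- def test(ladder, k):
--     current = 0
--
--     for step in ladder:
--         jump = step - current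
--         current = step
--         if jump > k:
--             return False
--         elif jump == k:
--             k -= 1
--
--     return True
--
-- def monkey(ladder, begin, end):
--     while begin <= end:
--         k = (begin + end) // 2
--         if test(ladder, k):
--             end = k - 1
--         else:
--             begin = k + 1
--     return begin
-- ===== Notes on version B (the rewrite author's own statement) =====
-- stated objective: idiomatic
-- what changed: The recursive binary search is rewritten as an iterative while-loop maintaining begin/end as mutable state and returning begin when the interval empties; test is unchanged.
import Mathlib
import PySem

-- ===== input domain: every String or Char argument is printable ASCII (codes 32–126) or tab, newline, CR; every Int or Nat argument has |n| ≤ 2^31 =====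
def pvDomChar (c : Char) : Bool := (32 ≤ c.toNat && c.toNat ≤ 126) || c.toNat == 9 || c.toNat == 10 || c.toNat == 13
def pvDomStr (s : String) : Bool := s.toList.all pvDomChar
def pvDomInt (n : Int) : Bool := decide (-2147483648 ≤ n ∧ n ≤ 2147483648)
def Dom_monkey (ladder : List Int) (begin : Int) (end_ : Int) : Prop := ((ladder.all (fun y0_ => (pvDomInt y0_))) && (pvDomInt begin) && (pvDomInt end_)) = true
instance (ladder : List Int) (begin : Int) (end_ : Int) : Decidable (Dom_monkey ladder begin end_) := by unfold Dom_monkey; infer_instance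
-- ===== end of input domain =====

-- B rewrites the recursive binary search as an iterative while-loop over (begin, end) state; same result, idiomatic form.


-- ===== PORT A =====
-- helper 'test': the for-loop over ladder with state (current, k) and early return False
def testGo (k : Int) (current : Int) : List Int → Bool
  | [] => true
  | step :: rest =>
    let jump := step - current
    if jump > k then false
    else if jump = k then testGo (k - 1) step rest
    else testGo k step rest

def test (ladder : List Int) (k : Int) : Bool := testGo k 0 ladder

-- recursive binary search, transliterating A
def monkey (ladder : List Int) (begin : Int) (end_ : Int) : Int :=
  if h : begin > end_ then begin
  else
    let k := PySem.Int.floordiv (begin + end_) 2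
    if test ladder k then monkey ladder begin (k - 1)
    else monkey ladder (k + 1) end_
termination_by (end_ - begin + 1).toNat
decreasing_by
  · have := PySem.Int.floordiv_two_mid_bounds (lo := begin) (hi := end_) (by omega)
    omega
  · have := PySem.Int.floordiv_two_mid_bounds (lo := begin) (hi := end_) (by omega)
    omega

-- ===== PORT B =====
-- the while-loop: state is the pair (begin, end); loop while begin ≤ end, then return begin
def monkeyLoop (ladder : List Int) : Int × Int → Int × Int
  | (b, e) =>
    if h : b ≤ e then
      let k := PySem.Int.floordiv (b + e) 2
      if test ladder k then monkeyLoop ladder (b, k - 1)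
      else monkeyLoop ladder (k + 1, e)
    else (b, e)
termination_by p => (p.2 - p.1 + 1).toNat
decreasing_by
  · have := PySem.Int.floordiv_two_mid_bounds (lo := b) (hi := e) h
    omega
  · have := PySem.Int.floordiv_two_mid_bounds (lo := b) (hi := e) h
    omega

def monkey_alt (ladder : List Int) (begin : Int) (end_ : Int) : Int :=
  (monkeyLoop ladder (begin, end_)).1

-- ===== PRECONDITION & SPEC =====
def Spec_monkey (ladder : List Int) (begin : Int) (end_ : Int) (out : Int) : Prop := out = monkey_alt ladder begin end_
instance (ladder : List Int) (begin : Int) (end_ : Int) (out : Int) : Decidable (Spec_monkey ladder begin end_ out) := by unfold Spec_monkey; infer_instance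

-- ===== CLAIM (what is proved, stated in full; the proofs are below) =====
def Claim_equal_monkey : Prop := ∀ (ladder : List Int) (begin : Int) (end_ : Int), Dom_monkey ladder begin end_ → Spec_monkey ladder begin end_ (monkey ladder begin end_)

-- ===== LEMMAS AND PROOFS =====

theorem loop_eq_monkey (ladder : List Int) :
    ∀ (n : Nat) (b e : Int), (e - b + 1).toNat = n → (monkeyLoop ladder (b, e)).1 = monkey ladder b e := by
  intro n
  induction n using Nat.strong_induction_on with
  | _ n ih =>
    intro b e hn
    rw [monkeyLoop, monkey]
    by_cases h : b ≤ e
    · have hb := PySem.Int.floordiv_two_mid_bounds (lo := b) (hi := e) h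
      simp only [dif_pos h, dif_neg (by omega : ¬ b > e)]
      split
      · exact ih _ (by omega) b _ rfl
      · exact ih _ (by omega) _ e rfl
    · have hgt : b > e := by omega
      rw [dif_neg h, dif_pos hgt]

-- ===== VERDICT (by name: the statement is the Claim_ definition above) =====
theorem monkey_spec : Claim_equal_monkey := by
  intro ladder b e _
  unfold Spec_monkey monkey_alt
  exact (loop_eq_monkey ladder _ b e rfl).symm
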